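-- pv_equiv track=rewrite | github.com/C-H-activation/ICB-workflow-dask | project/createCH.py | checkForAtomDuplicates
-- ===== SOURCE A (Python) =====
-- def checkForAtomDuplicates(atoms, nuclear_charge):
--     """Check for duplicates of nuclear_charges in atoms list."""
--     # check if nulcear charge exists at all
--     if nuclear_charge not in atoms:
--        return False
--     # set up a hash table to count occurence
--     hash_dict={}
--     for elem in atoms:
--         if elem not in hash_dict:
--            hash_dict[elem] = 1
--         else:
--            hash_dict[elem] += 1
--      # nuclear charge is more than once in atom list
--     if hash_dict[nuclear_charge] > 1:
--         return True
--     return False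
-- ===== SOURCE B (Python) =====
-- def checkForAtomDuplicates(atoms, nuclear_charge):
--     """Check for duplicates of nuclear_charge in atoms: one early-exit pass with a single counter."""
--     seen = 0
--     for elem in atoms:
--         if elem == nuclear_charge:
--             seen += 1
--             if seen == 2:
--                 return True
--     return False
-- ===== Notes on version B (the rewrite author's own statement) =====
-- stated objective: simpler
-- what changed: Replaces the membership pre-check plus full frequency dictionary with a single early-exit pass maintaining one integer counter of occurrences of nuclear_charge, returning True as soon as it reaches 2.
import Mathlib
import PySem

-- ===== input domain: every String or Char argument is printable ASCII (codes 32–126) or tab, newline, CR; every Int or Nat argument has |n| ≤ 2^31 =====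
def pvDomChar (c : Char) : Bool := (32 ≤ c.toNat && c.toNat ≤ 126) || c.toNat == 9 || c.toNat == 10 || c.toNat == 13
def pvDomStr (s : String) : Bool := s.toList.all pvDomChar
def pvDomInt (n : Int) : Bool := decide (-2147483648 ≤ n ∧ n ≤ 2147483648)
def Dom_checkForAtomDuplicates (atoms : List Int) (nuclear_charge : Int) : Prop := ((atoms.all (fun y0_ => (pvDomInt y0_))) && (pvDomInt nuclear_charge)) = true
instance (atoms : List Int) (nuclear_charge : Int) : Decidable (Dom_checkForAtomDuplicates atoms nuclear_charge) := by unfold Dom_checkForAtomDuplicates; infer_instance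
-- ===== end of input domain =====

-- B drops A's membership pre-check and frequency dictionary for a single early-exit pass
-- with one counter of occurrences of nuclear_charge (objective: simpler).

-- ===== PORT A =====
-- literal port of A: membership check, then a frequency dict built over all of atoms,
-- then a lookup of nuclear_charge (present by the membership check, so getD is exact)
def checkForAtomDuplicates (atoms : List Int) (nuclear_charge : Int) : Bool :=
  if ¬ atoms.contains nuclear_charge then false
  else
    let hash_dict : PySem.Dict Int Int :=
      atoms.foldl (fun d elem =>
        if ¬ d.contains elem then d.insert elem 1
        else d.modify elem 0 (· + 1)) PySem.Dict.empty
    if hash_dict.getD nuclear_charge 0 > 1 then true else false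

-- ===== PORT B =====
-- the for-loop of Source B with its early return, as structural recursion carrying the counter
def pvAltGo (atoms : List Int) (nuclear_charge : Int) (seen : Int) : Bool :=
  match atoms with
  | [] => false
  | elem :: rest =>
    if elem = nuclear_charge then
      if seen + 1 = 2 then true else pvAltGo rest nuclear_charge (seen + 1)
    else pvAltGo rest nuclear_charge seen

def checkForAtomDuplicates_alt (atoms : List Int) (nuclear_charge : Int) : Bool :=
  pvAltGo atoms nuclear_charge 0

-- ===== PRECONDITION & SPEC =====
def Spec_checkForAtomDuplicates (atoms : List Int) (nuclear_charge : Int) (out : Bool) : Prop := out = checkForAtomDuplicates_alt atoms nuclear_charge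
instance (atoms : List Int) (nuclear_charge : Int) (out : Bool) : Decidable (Spec_checkForAtomDuplicates atoms nuclear_charge out) := by unfold Spec_checkForAtomDuplicates; infer_instance

-- ===== CLAIM (what is proved, stated in full; the proofs are below) =====
def Claim_equal_checkForAtomDuplicates : Prop := ∀ (atoms : List Int) (nuclear_charge : Int), Dom_checkForAtomDuplicates atoms nuclear_charge → Spec_checkForAtomDuplicates atoms nuclear_charge (checkForAtomDuplicates atoms nuclear_charge)

-- ===== LEMMAS AND PROOFS =====

-- A's frequency dict counts occurrences
theorem pv_dict_count (l : List Int) (d : PySem.Dict Int Int) (v : Int) :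
    (l.foldl (fun d elem =>
        if ¬ d.contains elem then d.insert elem 1
        else d.modify elem 0 (· + 1)) d).getD v 0 = d.getD v 0 + l.count v := by
  induction l generalizing d with
  | nil => simp
  | cons e rest ih =>
    simp only [List.foldl_cons, List.count_cons, ih]
    by_cases hc : d.contains e = true
    · rw [if_neg (by simp [hc])]
      by_cases hv : v = e
      · subst hv
        rw [PySem.Dict.getD_modify_self]
        simp
        omega
      · rw [PySem.Dict.getD_modify_of_ne _ _ _ hv]
        simp [beq_iff_eq, Ne.symm hv]
    · rw [if_pos (by simp [hc])]
      by_cases hv : v = e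
      · subst hv
        have h0 : d.getD v 0 = 0 := by
          have := (PySem.Dict.get?_eq_none_iff_contains d v).mpr (by simpa using hc)
          simp [PySem.Dict.getD, this]
        rw [PySem.Dict.getD_insert_self, h0]
        simp
        omega
      · rw [PySem.Dict.getD_insert_of_ne _ _ _ hv]
        simp [beq_iff_eq, Ne.symm hv]

-- B's loop tests whether the running counter ever reaches 2
theorem pv_altGo_eq (l : List Int) (nc : Int) (seen : Int) (h : seen = 0 ∨ seen = 1) :
    pvAltGo l nc seen = decide (2 ≤ seen + l.count nc) := by
  induction l generalizing seen with
  | nil => simp [pvAltGo]; omega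
  | cons e rest ih =>
    simp only [pvAltGo, List.count_cons]
    by_cases he : e = nc
    · simp only [he, if_true]
      by_cases h2 : seen + 1 = 2
      · simp only [h2, if_true]
        simp
        omega
      · have h1 : seen + 1 = 0 ∨ seen + 1 = 1 := by omega
        simp only [h2, if_false, ih _ h1]
        simp
        constructor <;> intro <;> omega
    · have hne : (e == nc) = false := by simp [he]
      simp [he, hne, ih _ h]

-- ===== VERDICT (by name: the statement is the Claim_ definition above) =====
theorem checkForAtomDuplicates_spec : Claim_equal_checkForAtomDuplicates := by
  intro atoms nc _
  show checkForAtomDuplicates atoms nc = checkForAtomDuplicates_alt atoms nc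
  unfold checkForAtomDuplicates checkForAtomDuplicates_alt
  rw [pv_altGo_eq atoms nc 0 (Or.inl rfl)]
  by_cases hm : atoms.contains nc = true
  · rw [if_neg (by simpa using hm)]
    have h0 : (PySem.Dict.empty : PySem.Dict Int Int).getD nc 0 = 0 := rfl
    simp only [pv_dict_count, h0, gt_iff_lt]
    by_cases h2 : (2 : Int) ≤ 0 + atoms.count nc
    · rw [if_pos (by omega)]
      exact (decide_eq_true h2).symm
    · rw [if_neg (by omega)]
      exact (decide_eq_false h2).symm
  · rw [if_pos (by simpa using hm)]
    have hcnt : atoms.count nc = 0 := by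
      rw [List.count_eq_zero]
      intro hmem
      exact hm (by simpa [List.contains_iff_mem] using hmem)
    simp [hcnt]
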